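-- pv_equiv track=rewrite | github.com/afoerder/mars-tyxn-classifier | src/mars_tyxn/predict_ensemble.py | _second_best_class
-- ===== SOURCE A (Python) =====
-- from collections import Counter
-- from typing import Any, Dict, List, Sequence, Tuple
--
-- def _second_best_class(votes: Sequence[str], exclude: str = "X") -> str:
--     counts = Counter(votes)
--     ranked = counts.most_common()
--     alternatives = [label for label, _ in ranked if label != exclude]
--     if alternatives:
--         return str(alternatives[0])
--     if "Y" in counts:
--         return "Y"
--     if "T" in counts:
--         return "T"
--     if "N" in counts:
--         return "N"
--     return "Y"
-- ===== SOURCE B (Python) =====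
-- def _second_best_class(votes, exclude="X"):
--     counts = {}
--     for v in votes:
--         counts[v] = counts.get(v, 0) + 1
--     best = None
--     best_n = 0
--     for label, n in counts.items():
--         if label != exclude and n > best_n:
--             best, best_n = label, n
--     if best is not None:
--         return best
--     if "Y" in counts:
--         return "Y"
--     if "T" in counts:
--         return "T"
--     if "N" in counts:
--         return "N"
--     return "Y"
-- ===== Notes on version B (the rewrite author's own statement) =====
-- stated objective: simpler
-- what changed: Replaces Counter + most_common() sort + filtered list build with a plain dict built in one pass and a single linear scan tracking the strictly-greatest count among non-excluded labels (strict > reproduces most_common's first-inserted tie order); same Y/T/N fallback chain.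
import Mathlib
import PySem

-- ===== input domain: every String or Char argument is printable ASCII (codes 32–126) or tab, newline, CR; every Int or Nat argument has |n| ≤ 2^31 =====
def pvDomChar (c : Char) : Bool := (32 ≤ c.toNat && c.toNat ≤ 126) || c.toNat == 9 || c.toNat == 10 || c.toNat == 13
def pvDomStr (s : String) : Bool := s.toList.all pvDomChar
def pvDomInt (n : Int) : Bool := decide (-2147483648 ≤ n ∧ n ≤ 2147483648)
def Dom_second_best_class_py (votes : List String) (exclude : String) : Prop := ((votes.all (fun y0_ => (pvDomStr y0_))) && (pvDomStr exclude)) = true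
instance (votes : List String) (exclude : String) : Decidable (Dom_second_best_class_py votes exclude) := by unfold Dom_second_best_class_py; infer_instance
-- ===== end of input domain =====

-- B replaces Counter + most_common() + filtered list with one dict pass and a single
-- strict-argmax scan over the items (same result; objective: simpler).


-- ===== PORT A =====
-- counts = Counter(votes); ranked = counts.most_common()  (= sorted(items, key=count, reverse=True), stable)
def second_best_class_py (votes : List String) (exclude : String) : String :=
  let counts := PySem.Dict.counter votes
  let ranked := PySem.List.sorted counts.items (fun p => p.2) true
  let alternatives := (ranked.filter (fun p => p.1 != exclude)).map (fun p => p.1)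
  match alternatives with
  | a :: _ => a
  | [] =>
    if counts.contains "Y" then "Y"
    else if counts.contains "T" then "T"
    else if counts.contains "N" then "N"
    else "Y"

-- ===== PORT B =====
-- one dict-building pass, then a single strict-argmax scan over counts.items()
def second_best_class_py_alt (votes : List String) (exclude : String) : String :=
  let counts := votes.foldl (fun d v => d.insert v (d.getD v 0 + 1)) PySem.Dict.empty
  let best := counts.items.foldl
    (fun (acc : Option String × Int) p =>
      if p.1 ≠ exclude ∧ acc.2 < p.2 then (some p.1, p.2) else acc) (none, 0)
  match best.1 with
  | some l => l
  | none =>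
    if counts.contains "Y" then "Y"
    else if counts.contains "T" then "T"
    else if counts.contains "N" then "N"
    else "Y"

-- ===== PRECONDITION & SPEC =====
def Spec_second_best_class_py (votes : List String) (exclude : String) (out : String) : Prop := out = second_best_class_py_alt votes exclude
instance (votes : List String) (exclude : String) (out : String) : Decidable (Spec_second_best_class_py votes exclude out) := by unfold Spec_second_best_class_py; infer_instance

-- ===== CLAIM (what is proved, stated in full; the proofs are below) =====
def Claim_equal_second_best_class_py : Prop := ∀ (votes : List String) (exclude : String), Dom_second_best_class_py votes exclude → Spec_second_best_class_py votes exclude (second_best_class_py votes exclude)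

-- ===== LEMMAS AND PROOFS =====

-- filtering away the inserted element leaves the filter unchanged
theorem filter_insertBy_neg (P : String × Int → Bool) (bef : String × Int → String × Int → Bool)
    (x : String × Int) (l : List (String × Int)) (hx : P x = false) :
    (PySem.List.insertBy bef x l).filter P = l.filter P := by
  induction l with
  | nil => simp [PySem.List.insertBy, hx]
  | cons y ys ih =>
    by_cases h : bef x y = true
    · simp [PySem.List.insertBy, h, hx]
    · simp only [PySem.List.insertBy, h, if_neg, Bool.not_eq_true] at *
      simp [List.filter_cons, ih]

-- head of the filtered result after inserting x into a count-descending list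
theorem filter_insertBy_head (P : String × Int → Bool)
    (x : String × Int) (l : List (String × Int))
    (hl : l.Pairwise (fun a b => b.2 ≤ a.2)) (hx : P x = true) :
    ((PySem.List.insertBy (fun a b => decide (b.2 < a.2)) x l).filter P).head? =
      match (l.filter P).head? with
      | none => some x
      | some m => if m.2 < x.2 then some x else some m := by
  induction l with
  | nil => simp [PySem.List.insertBy, hx]
  | cons y ys ih =>
    have hys : ys.Pairwise (fun a b => b.2 ≤ a.2) := hl.tail
    have hle : ∀ z ∈ ys, z.2 ≤ y.2 := by
      intro z hz; exact (List.pairwise_cons.mp hl).1 z hz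
    by_cases h : y.2 < x.2
    · -- x is inserted at the front
      simp only [PySem.List.insertBy, decide_eq_true_eq, if_pos h]
      cases hm : ((y :: ys).filter P).head? with
      | none => simp [List.filter_cons, hx]
      | some m =>
        have hmem : m ∈ (y :: ys).filter P := by
          cases hfe : (y :: ys).filter P with
          | nil => simp [hfe] at hm
          | cons a t => simp [hfe] at hm; simp [hm]
        have hm2 : m.2 ≤ y.2 := by
          rcases List.mem_filter.mp hmem with ⟨hmem', _⟩
          rcases List.mem_cons.mp hmem' with h' | h'
          · exact le_of_eq (by rw [h'])
          · exact hle m h'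
        have : m.2 < x.2 := lt_of_le_of_lt hm2 h
        simp [List.filter_cons, hx, this]
    · -- x goes after y
      simp only [PySem.List.insertBy, decide_eq_true_eq, if_neg h]
      by_cases hPy : P y = true
      · simp [hPy, h]
      · have hPy' : P y = false := by simp_all
        simp [hPy', ih hys]

-- the strict-argmax fold equals the head of the filtered reverse-sorted list
theorem argmax_eq_sorted_head (exclude : String) (L : List (String × Int))
    (hpos : ∀ p ∈ L, 1 ≤ p.2) :
    L.foldl (fun (acc : Option String × Int) p =>
        if p.1 ≠ exclude ∧ acc.2 < p.2 then (some p.1, p.2) else acc) (none, 0) =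
      match ((PySem.List.sorted L (fun p => p.2) true).filter (fun p => p.1 != exclude)).head? with
      | none => (none, 0)
      | some m => (some m.1, m.2) := by
  induction L using List.reverseRecOn with
  | nil => simp [PySem.List.sorted]
  | append_singleton L x ih =>
    have hposL : ∀ p ∈ L, 1 ≤ p.2 := fun p hp => hpos p (List.mem_append_left _ hp)
    have hxpos : 1 ≤ x.2 := hpos x (List.mem_append_right _ (List.mem_singleton.mpr rfl))
    have hsorted : PySem.List.sorted (L ++ [x]) (fun p => p.2) true =
        PySem.List.insertBy (fun a b => decide (b.2 < a.2)) x
          (PySem.List.sorted L (fun p => p.2) true) := by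
      rw [PySem.List.sorted_rev_eq_foldl_insertBy, PySem.List.sorted_rev_eq_foldl_insertBy,
        List.foldl_append]
      rfl
    have hpw : (PySem.List.sorted L (fun p => p.2) true).Pairwise (fun a b => b.2 ≤ a.2) :=
      PySem.List.sorted_pairwise_rev L (fun p => p.2)
    rw [List.foldl_append, List.foldl_cons, List.foldl_nil, ih hposL, hsorted]
    by_cases hPx : x.1 ≠ exclude
    · have hPx' : (fun p : String × Int => p.1 != exclude) x = true := by simpa using hPx
      rw [filter_insertBy_head _ x _ hpw hPx']
      cases hm : ((PySem.List.sorted L (fun p => p.2) true).filter (fun p => p.1 != exclude)).head? with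
      | none =>
        have : (0 : Int) < x.2 := by omega
        simp [hPx, this]
      | some m =>
        by_cases hlt : m.2 < x.2
        · simp [hPx, hlt]
        · simp [hPx, hlt]
    · have hPx' : (fun p : String × Int => p.1 != exclude) x = false := by simpa using hPx
      rw [filter_insertBy_neg _ _ x _ hPx']
      cases hm : ((PySem.List.sorted L (fun p => p.2) true).filter (fun p => p.1 != exclude)).head? with
      | none => simp [hPx]
      | some m => simp [hPx]

-- ===== VERDICT (by name: the statement is the Claim_ definition above) =====
theorem second_best_class_py_spec : Claim_equal_second_best_class_py := by
  intro votes exclude _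
  simp only [Spec_second_best_class_py, second_best_class_py, second_best_class_py_alt,
    PySem.Dict.foldl_insert_getD_add_one_eq_counter]
  have hpos : ∀ p ∈ (PySem.Dict.counter votes).items, 1 ≤ p.2 := by
    intro p hp
    rw [PySem.Dict.items_counter] at hp
    rcases List.mem_map.mp hp with ⟨k, hk, rfl⟩
    have : k ∈ votes := (PySem.Set.mem_ofList votes k).mp hk
    have := List.count_pos_iff.mpr this
    simp; omega
  rw [argmax_eq_sorted_head exclude _ hpos]
  cases hm : ((PySem.List.sorted (PySem.Dict.counter votes).items (fun p => p.2) true).filter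
      (fun p => p.1 != exclude)).head? with
  | none =>
    have : ((PySem.List.sorted (PySem.Dict.counter votes).items (fun p => p.2) true).filter
        (fun p => p.1 != exclude)) = [] := List.head?_eq_none_iff.mp hm
    rw [this]; rfl
  | some m =>
    rcases List.head?_eq_some_iff.mp hm with ⟨t, ht⟩
    simp [ht]
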